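-- pv_equiv track=rewrite | github.com/22Pickles/MidnightStrategyAnalysis | int/strategies.py | str4
-- ===== SOURCE A (Python) =====
-- from typing import List
--
-- def str4(roll: List[int], pocket: List[int]) -> List[int]:
--     s: List[int] = []
--     if 1 not in pocket:
--         for i in range(len(roll)):
--             if roll[i] == 1:
--                 s.append(roll[i])
--                 break
--     if 4 not in pocket:
--         for i in range(len(roll)):
--             if roll[i] == 4:
--                 s.append(roll[i])
--                 break
--     for i in range(len(roll)):
--         if roll[i] == 6:
--             if len(roll) - len(s) < 5 and ((1 not in pocket) or (4 not in pocket)):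
--                 break
--             else:
--                 s.append(roll[i])
--     if len(s) == 0:
--         s.append(max(roll))
--     return s
-- ===== SOURCE B (Python) =====
-- def str4(roll, pocket):
--     # staged computation: kept 1/4 via a comprehension, number of kept 6s derived arithmetically
--     s = [v for v in (1, 4) if v not in pocket and v in roll]
--     sixes = roll.count(6)
--     if 1 in pocket and 4 in pocket:
--         keep = sixes
--     else:
--         keep = min(sixes, max(0, len(roll) - 4 - len(s)))
--     s += [6] * keep
--     return s if s else [max(roll)]
-- ===== Notes on version B (the rewrite author's own statement) =====
-- stated objective: simpler
-- what changed: Replaces A's three index loops (two break-on-first-match scans and a running-break loop whose stop test depends on the growing kept list) by a staged computation: a comprehension picks the kept 1/4, and the number of kept 6s is derived in closed form as min(count of 6s, max(0, len(roll)-4-len(s))).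
import Mathlib
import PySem

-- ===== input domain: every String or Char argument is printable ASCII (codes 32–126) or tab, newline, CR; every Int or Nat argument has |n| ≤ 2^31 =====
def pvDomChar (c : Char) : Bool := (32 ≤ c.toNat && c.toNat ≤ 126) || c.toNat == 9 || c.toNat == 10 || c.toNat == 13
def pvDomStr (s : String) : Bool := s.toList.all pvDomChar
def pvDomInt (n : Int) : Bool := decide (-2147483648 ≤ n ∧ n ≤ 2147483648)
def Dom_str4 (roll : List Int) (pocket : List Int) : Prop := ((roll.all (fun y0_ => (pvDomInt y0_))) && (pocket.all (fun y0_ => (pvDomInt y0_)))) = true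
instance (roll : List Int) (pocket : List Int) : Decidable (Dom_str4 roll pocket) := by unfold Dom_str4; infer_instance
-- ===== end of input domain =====

-- B is a simpler staged computation (comprehension + closed-form count of kept 6s); equal to A on nonempty rolls.

-- ===== PORT A =====
-- 'for i in range(len(roll)): if roll[i] == t: s.append(roll[i]); break'
def str4FindLoop (xs : List Int) (t : Int) (s : List Int) : List Int :=
  match xs with
  | [] => s
  | x :: r => if x = t then s ++ [x] else str4FindLoop r t s

-- the 6-loop: 'for i in range(len(roll)): if roll[i] == 6: if len(roll)-len(s) < 5 and (...): break else s.append(roll[i])'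
def str4SixLoop (xs : List Int) (n : Nat) (pocket : List Int) (s : List Int) : List Int :=
  match xs with
  | [] => s
  | x :: r =>
    if x = 6 then
      if (n : Int) - s.length < 5 ∧ (¬ (1:Int) ∈ pocket ∨ ¬ (4:Int) ∈ pocket) then s
      else str4SixLoop r n pocket (s ++ [x])
    else str4SixLoop r n pocket s

def str4 (roll : List Int) (pocket : List Int) : List Int :=
  let s : List Int := []
  let s := if ¬ (1:Int) ∈ pocket then str4FindLoop roll 1 s else s
  let s := if ¬ (4:Int) ∈ pocket then str4FindLoop roll 4 s else s
  let s := str4SixLoop roll roll.length pocket s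
  if s.length = 0 then s ++ (PySem.List.max? roll (fun y => y)).toList else s

-- ===== PORT B =====
def str4_alt (roll : List Int) (pocket : List Int) : List Int :=
  let s := ([1, 4] : List Int).filter (fun v => decide (v ∉ pocket ∧ v ∈ roll))
  let sixes : Int := (PySem.List.count roll 6 : Nat)
  let keep : Int :=
    if (1:Int) ∈ pocket ∧ (4:Int) ∈ pocket then sixes
    else min sixes (max 0 ((roll.length : Int) - 4 - s.length))
  let s := s ++ List.replicate keep.toNat 6
  if s = [] then (PySem.List.max? roll (fun y => y)).toList else s

-- ===== PRECONDITION & SPEC =====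
-- Pre_ excludes exactly the empty roll, on which A's max(roll) raises ValueError (B raises there too).
def Pre_str4 (roll : List Int) (pocket : List Int) : Prop := roll ≠ []
instance (roll : List Int) (pocket : List Int) : Decidable (Pre_str4 roll pocket) := by unfold Pre_str4; infer_instance
def pvWitness_str4 : List Int × List Int := ([6, 1, 6], [4])

def Spec_str4 (roll : List Int) (pocket : List Int) (out : List Int) : Prop := out = str4_alt roll pocket
instance (roll : List Int) (pocket : List Int) (out : List Int) : Decidable (Spec_str4 roll pocket out) := by unfold Spec_str4; infer_instance

-- ===== CLAIM (what is proved, stated in full; the proofs are below) =====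
def Claim_equal_str4 : Prop := ∀ (roll : List Int) (pocket : List Int), Dom_str4 roll pocket → Pre_str4 roll pocket → Spec_str4 roll pocket (str4 roll pocket)

-- ===== LEMMAS AND PROOFS =====

theorem str4FindLoop_eq (xs : List Int) (t : Int) (s : List Int) :
    str4FindLoop xs t s = s ++ (if t ∈ xs then [t] else []) := by
  induction xs with
  | nil => simp [str4FindLoop]
  | cons x r ih =>
    by_cases h : x = t
    · subst h; simp [str4FindLoop]
    · simp [str4FindLoop, h, ih, Ne.symm h]

theorem str4SixLoop_all (xs : List Int) (n : Nat) (pocket : List Int) (s : List Int)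
    (h1 : (1:Int) ∈ pocket) (h4 : (4:Int) ∈ pocket) :
    str4SixLoop xs n pocket s = s ++ List.replicate (xs.count 6) 6 := by
  induction xs generalizing s with
  | nil => simp [str4SixLoop]
  | cons x r ih =>
    by_cases h : x = 6
    · subst h
      rw [str4SixLoop]
      simp only [h1, h4, not_true_eq_false, or_self, and_false, if_false, ih]
      rw [List.count_cons_self, List.replicate_succ, List.append_assoc]
      rfl
    · rw [str4SixLoop]
      simp [h, ih]

theorem str4SixLoop_brk (xs : List Int) (n : Nat) (pocket : List Int) (s : List Int)
    (h : ¬ (1:Int) ∈ pocket ∨ ¬ (4:Int) ∈ pocket) :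
    str4SixLoop xs n pocket s
      = s ++ List.replicate (min (xs.count 6) ((n : Int) - 4 - s.length).toNat) 6 := by
  induction xs generalizing s with
  | nil => simp [str4SixLoop]
  | cons x r ih =>
    by_cases h6 : x = 6
    · subst h6
      rw [str4SixLoop]
      by_cases hb : (n : Int) - s.length < 5
      · have : ((n : Int) - 4 - s.length).toNat = 0 := by omega
        simp [hb, h, this]
      · simp only [hb, false_and, if_false, ih]
        have hpos : 1 ≤ (n : Int) - 4 - s.length := by omega
        have harg : ((n : Int) - 4 - ((s ++ [(6:Int)]).length : Int)).toNat
            = ((n : Int) - 4 - s.length).toNat - 1 := by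
          simp only [List.length_append, List.length_cons, List.length_nil]
          omega
        have hmin : min ((6 :: r : List Int).count 6) (((n : Int) - 4 - s.length).toNat)
            = min (r.count 6) (((n : Int) - 4 - s.length).toNat - 1) + 1 := by
          simp only [List.count_cons_self]
          omega
        rw [harg, hmin, List.replicate_succ, List.append_assoc]
        rfl
    · rw [str4SixLoop]
      simp [h6, ih]

theorem keep_eq (c n : Nat) (m : Int) :
    (min (c : Int) (max 0 ((n : Int) - 4 - m))).toNat = min c ((n : Int) - 4 - m).toNat := by
  omega

-- the common normal form of both programs
set_option maxHeartbeats 1600000 in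
theorem str4_eq_alt (roll : List Int) (pocket : List Int) :
    str4 roll pocket = str4_alt roll pocket := by
  by_cases h1 : (1:Int) ∈ pocket <;> by_cases h4 : (4:Int) ∈ pocket <;>
    by_cases r1 : (1:Int) ∈ roll <;> by_cases r4 : (4:Int) ∈ roll <;>
      simp only [str4, str4_alt, h1, h4, r1, r4, if_true, if_false,
        and_self, and_true, and_false, str4FindLoop_eq,
        List.filter, decide_true, decide_false, not_false_eq_true,
        decide_not, PySem.List.count_eq,
        List.nil_append, List.append_nil, List.cons_append, Int.toNat_natCast] <;>
  first
  | (rw [str4SixLoop_all _ _ _ _ h1 h4]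
     split_ifs with ha hb hb <;> simp_all)
  | (rw [str4SixLoop_brk _ _ _ _ (by tauto), keep_eq]
     split_ifs with ha hb hb <;> simp_all <;> omega)

-- ===== VERDICT (by name: the statement is the Claim_ definition above) =====
theorem str4_spec : Claim_equal_str4 := by
  intro roll pocket _ _
  unfold Spec_str4
  exact str4_eq_alt roll pocket
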